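-- pv_equiv track=rewrite | github.com/OutlineFoundation/developer-documentation | scripts/convert_go_tabs.py | split_at_first_code_block
-- ===== SOURCE A (Python) =====
-- def split_at_first_code_block(content: str) -> tuple[str, str]:
--     """Split content after the first complete code block.
--
--     Returns (tab_content, trailing_content). If no code block is found
--     or there's no trailing content, trailing_content is empty.
--     """
--     content_lines = content.split("\n")
--     in_code = False
--     code_end = -1
--
--     for idx, line in enumerate(content_lines):
--         if line.strip().startswith("```"):
--             if not in_code:
--                 in_code = True
--             else:
--                 in_code = False
--                 code_end = idx
--                 break
--
--     if code_end == -1: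
--         return content, ""
--
--     trailing = "\n".join(content_lines[code_end + 1 :]).strip("\n")
--     if not trailing.strip():
--         return content, ""
--
--     tab_part = "\n".join(content_lines[: code_end + 1]).strip("\n")
--     return tab_part, trailing
-- ===== SOURCE B (Python) =====
-- def split_at_first_code_block(content: str) -> tuple[str, str]:
--     """Split content after the first complete code block.
--
--     Index-free decomposition: partition the line list into segments
--     (pre, opening fence, body, closing fence, post) and reassemble,
--     instead of scanning with a toggle flag and slicing by index.
--     """
--     lines = content.split("\n")
--     pre, rest = _span_to_fence(lines)
--     if rest is None:
--         return content, ""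
--     f1, after1 = rest
--     body, rest2 = _span_to_fence(after1)
--     if rest2 is None:
--         return content, ""
--     f2, post = rest2
--     trailing = "\n".join(post).strip("\n")
--     if not trailing.strip():
--         return content, ""
--     tab_part = "\n".join(pre + [f1] + body + [f2]).strip("\n")
--     return tab_part, trailing
--
--
-- def _span_to_fence(lines):
--     """Split lines into (before_first_fence, (fence_line, after)) or (lines, None)."""
--     before = []
--     it = iter(lines)
--     for l in it:
--         if l.strip().startswith("```"):
--             return before, (l, list(it))
--         before.append(l)
--     return before, None
-- ===== Notes on version B (the rewrite author's own statement) =====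
-- stated objective: alternative
-- what changed: Replaces A's index-based toggle scan (in_code flag, code_end index, list slicing) with an index-free segment partition: the line list is split into (pre, opening fence, body, closing fence, post) segments and the two halves are reassembled by concatenating segments, with no indices or slices anywhere.
import Mathlib
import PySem

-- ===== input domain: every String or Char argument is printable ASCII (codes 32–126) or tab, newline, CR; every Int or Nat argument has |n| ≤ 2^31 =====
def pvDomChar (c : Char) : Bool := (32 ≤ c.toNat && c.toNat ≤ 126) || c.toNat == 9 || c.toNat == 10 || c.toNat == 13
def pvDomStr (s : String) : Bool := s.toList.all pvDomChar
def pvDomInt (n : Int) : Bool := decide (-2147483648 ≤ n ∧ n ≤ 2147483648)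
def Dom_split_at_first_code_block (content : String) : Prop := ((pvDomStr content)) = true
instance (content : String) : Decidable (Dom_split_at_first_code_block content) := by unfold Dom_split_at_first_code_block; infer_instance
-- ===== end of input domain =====

-- B replaces A's index-based toggle scan with an index-free segment partition
-- (pre / opening fence / body / closing fence / post) reassembled by concatenation
-- (objective: alternative decomposition, same cost).

-- ===== PORT A =====
-- the for-loop with in_code flag and break, as structural recursion over the lines
def pvFindEndA : List String → Bool → Int → Int
  | [], _, _ => -1
  | l :: rest, inCode, idx =>
    if PySem.Str.startswith (PySem.Str.strip l) "```" then
      if !inCode then pvFindEndA rest true (idx + 1)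
      else idx
    else pvFindEndA rest inCode (idx + 1)

def split_at_first_code_block (content : String) : String × String :=
  let content_lines := (PySem.Str.split? content "\n").getD []
  let code_end := pvFindEndA content_lines false 0
  if code_end == -1 then (content, "")
  else
    let trailing := PySem.Str.stripChars
      (PySem.Str.join "\n" (PySem.List.slice content_lines (some (code_end + 1)) none)) "\n"
    if PySem.Str.strip trailing == "" then (content, "")
    else
      let tab_part := PySem.Str.stripChars
        (PySem.Str.join "\n" (PySem.List.slice content_lines none (some (code_end + 1)))) "\n"
      (tab_part, trailing)

-- ===== PORT B =====
-- _span_to_fence: (before_first_fence, some (fence_line, after)) or (lines, none)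
def pvSpanFence : List String → List String × Option (String × List String)
  | [] => ([], none)
  | l :: rest =>
    if PySem.Str.startswith (PySem.Str.strip l) "```" then ([], some (l, rest))
    else
      let p := pvSpanFence rest
      (l :: p.1, p.2)

def split_at_first_code_block_alt (content : String) : String × String :=
  let lines := (PySem.Str.split? content "\n").getD []
  match pvSpanFence lines with
  | (_, none) => (content, "")
  | (pre, some (f1, after1)) =>
    match pvSpanFence after1 with
    | (_, none) => (content, "")
    | (body, some (f2, post)) =>
      let trailing := PySem.Str.stripChars (PySem.Str.join "\n" post) "\n"
      if PySem.Str.strip trailing == "" then (content, "")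
      else
        let tab_part := PySem.Str.stripChars
          (PySem.Str.join "\n" (pre ++ [f1] ++ body ++ [f2])) "\n"
        (tab_part, trailing)

-- ===== PRECONDITION & SPEC =====
def Spec_split_at_first_code_block (content : String) (out : String × String) : Prop := out = split_at_first_code_block_alt content
instance (content : String) (out : String × String) : Decidable (Spec_split_at_first_code_block content out) := by unfold Spec_split_at_first_code_block; infer_instance

-- ===== CLAIM (what is proved, stated in full; the proofs are below) =====
def Claim_equal_split_at_first_code_block : Prop := ∀ (content : String), Dom_split_at_first_code_block content → Spec_split_at_first_code_block content (split_at_first_code_block content)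

-- ===== LEMMAS AND PROOFS =====

-- the span reconstructs the list
theorem pvSpanFence_recon (ls : List String) :
    ls = (pvSpanFence ls).1 ++
      (match (pvSpanFence ls).2 with | none => [] | some (f, t) => f :: t) := by
  induction ls with
  | nil => rfl
  | cons l rest ih =>
    by_cases h : PySem.Chars.startswith (PySem.Chars.strip l.toList) ['`', '`', '`'] = true
    · simp [pvSpanFence, h]
    · simpa [pvSpanFence, h] using ih

theorem pvFindEndA_true_span (ls : List String) (idx : Int) :
    pvFindEndA ls true idx =
      match (pvSpanFence ls).2 with
      | none => -1
      | some _ => idx + ((pvSpanFence ls).1.length : Int) := by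
  induction ls generalizing idx with
  | nil => rfl
  | cons l rest ih =>
    by_cases h : PySem.Chars.startswith (PySem.Chars.strip l.toList) ['`', '`', '`'] = true
    · simp [pvFindEndA, pvSpanFence, h]
    · have h0 : pvFindEndA (l :: rest) true idx = pvFindEndA rest true (idx + 1) := by
        simp [pvFindEndA, h]
      have h1 : pvSpanFence (l :: rest) = (l :: (pvSpanFence rest).1, (pvSpanFence rest).2) := by
        simp [pvSpanFence, h]
      rw [h0, ih, h1]
      cases (pvSpanFence rest).2 with
      | none => rfl
      | some p => try dsimp only
                  simp only [List.length_cons]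
                  push_cast
                  ring

theorem pvFindEndA_false_span (ls : List String) (idx : Int) :
    pvFindEndA ls false idx =
      match (pvSpanFence ls).2 with
      | none => -1
      | some p =>
        match (pvSpanFence p.2).2 with
        | none => -1
        | some _ =>
          idx + ((pvSpanFence ls).1.length : Int) + 1 + ((pvSpanFence p.2).1.length : Int) := by
  induction ls generalizing idx with
  | nil => rfl
  | cons l rest ih =>
    by_cases h : PySem.Chars.startswith (PySem.Chars.strip l.toList) ['`', '`', '`'] = true
    · have h0 : pvFindEndA (l :: rest) false idx = pvFindEndA rest true (idx + 1) := by
        simp [pvFindEndA, h]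
      have h1 : pvSpanFence (l :: rest) = ([], some (l, rest)) := by
        simp [pvSpanFence, h]
      rw [h0, pvFindEndA_true_span, h1]
      try dsimp only
      cases (pvSpanFence rest).2 with
      | none => rfl
      | some p => try dsimp only
                  simp only [List.length_nil]
                  push_cast
                  ring
    · have h0 : pvFindEndA (l :: rest) false idx = pvFindEndA rest false (idx + 1) := by
        simp [pvFindEndA, h]
      have h1 : pvSpanFence (l :: rest) = (l :: (pvSpanFence rest).1, (pvSpanFence rest).2) := by
        simp [pvSpanFence, h]
      rw [h0, ih, h1]
      try dsimp only
      cases (pvSpanFence rest).2 with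
      | none => rfl
      | some p =>
        try dsimp only
        cases (pvSpanFence p.2).2 with
        | none => rfl
        | some q => try dsimp only
                    simp only [List.length_cons]
                    push_cast
                    ring

-- ===== VERDICT (by name: the statement is the Claim_ definition above) =====
theorem split_at_first_code_block_spec : Claim_equal_split_at_first_code_block := by
  intro content _
  unfold Spec_split_at_first_code_block
  simp only [split_at_first_code_block, split_at_first_code_block_alt]
  set lines := (PySem.Str.split? content "\n").getD [] with hlines
  rw [pvFindEndA_false_span]
  have hrec := pvSpanFence_recon lines
  obtain ⟨pre, o1, hsp1⟩ : ∃ a b, pvSpanFence lines = (a, b) := ⟨_, _, rfl⟩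
  rw [hsp1] at hrec
  cases o1 with
  | none => simp only [hsp1]; simp
  | some p =>
    obtain ⟨f1, after1⟩ := p
    simp only [hsp1]
    dsimp only at hrec
    have hrec2 := pvSpanFence_recon after1
    obtain ⟨body, o2, hsp2⟩ : ∃ a b, pvSpanFence after1 = (a, b) := ⟨_, _, rfl⟩
    rw [hsp2] at hrec2
    cases o2 with
    | none => simp only [hsp2]; simp
    | some q =>
      obtain ⟨f2, post⟩ := q
      simp only [hsp2]
      dsimp only at hrec2
      have hneg : ¬ (((0 : Int) + (pre.length : Int) + 1 + (body.length : Int) == -1) = true) := by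
        simp
        omega
      rw [if_neg hneg]
      have hcast : (0 : Int) + (pre.length : Int) + 1 + (body.length : Int) + 1
          = ((pre.length + body.length + 2 : Nat) : Int) := by push_cast; ring
      have hpref : lines = (pre ++ [f1] ++ body ++ [f2]) ++ post := by
        rw [hrec, hrec2]; simp
      have hlen : (pre ++ [f1] ++ body ++ [f2]).length = pre.length + body.length + 2 := by
        simp
        omega
      rw [hcast, PySem.List.slice_from_natCast, PySem.List.slice_to_natCast,
          hpref, ← hlen, List.drop_left, List.take_left]
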